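-- pv_equiv track=rewrite | github.com/dizys/nyu-nlp-homework-3 | src/main.py | get_unknown_word_class_by_suffix
-- ===== SOURCE A (Python) =====
-- from typing import Dict, List, Tuple, Set, Union, TypedDict
--
-- suffixes: List[Union[List[str], str]] = [['able', 'ible'], 'al', 'an', 'ar', 'ed', 'en', ['er', 'or'],
--                                          'est', 'ing', ['ish', 'ous', 'ful', 'less'], 'ive', 'ly', ['ment', 'ness'], 'y']
--
-- def get_unknown_word_class_by_suffix(word: str) -> str:
--     word_class = "UNKNOWN"
--     for suffix in suffixes:
--         if type(suffix) == list:
--             word_suffix_class = suffix[0].upper()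
--             selected = False
--             for suffix_item in suffix:
--                 if word.endswith(suffix_item):
--                     word_class = f"UNKNOWN_AFFIXED_WITH_{word_suffix_class}"
--                     selected = True
--                     break
--             if selected:
--                 break
--         else:
--             if word.endswith(suffix):
--                 word_class = f"UNKNOWN_AFFIXED_WITH_{suffix.upper()}"
--                 break
--     return word_class
-- ===== SOURCE B (Python) =====
-- from typing import Dict, List, Tuple, Set, Union, TypedDict
--
-- suffixes: List[Union[List[str], str]] = [['able', 'ible'], 'al', 'an', 'ar', 'ed', 'en', ['er', 'or'],
--                                          'est', 'ing', ['ish', 'ous', 'ful', 'less'], 'ive', 'ly', ['ment', 'ness'], 'y']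
--
-- # Flattened (suffix, label) pairs in priority order, built once at module load.
-- _pairs = []
-- for _s in suffixes:
--     if isinstance(_s, list):
--         _label = _s[0].upper()
--         _pairs.extend((item, _label) for item in _s)
--     else:
--         _pairs.append((_s, _s.upper()))
--
-- def get_unknown_word_class_by_suffix(word: str) -> str:
--     for suf, label in _pairs:
--         if word.endswith(suf):
--             return f"UNKNOWN_AFFIXED_WITH_{label}"
--     return "UNKNOWN"
-- ===== Notes on version B (the rewrite author's own statement) =====
-- stated objective: simpler
-- what changed: B precomputes a flat priority-ordered list of (suffix, label) pairs once, so the classifier is a single uniform scan with an early return instead of A's type-dispatched nested loops with flag/break control flow.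
import Mathlib
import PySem

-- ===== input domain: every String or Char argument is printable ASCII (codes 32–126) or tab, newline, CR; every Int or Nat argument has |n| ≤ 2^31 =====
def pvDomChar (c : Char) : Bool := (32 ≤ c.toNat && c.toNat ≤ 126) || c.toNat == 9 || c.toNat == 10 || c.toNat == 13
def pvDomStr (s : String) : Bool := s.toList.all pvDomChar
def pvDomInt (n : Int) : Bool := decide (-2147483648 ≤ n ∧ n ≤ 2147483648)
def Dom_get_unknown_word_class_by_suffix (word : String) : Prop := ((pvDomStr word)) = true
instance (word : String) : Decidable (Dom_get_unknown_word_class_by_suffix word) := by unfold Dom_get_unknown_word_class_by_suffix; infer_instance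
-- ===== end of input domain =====

-- B flattens the fixed suffix table into one (suffix, label) list at load time and classifies with a single uniform scan (simpler; same cost).


-- ===== PORT A =====
-- the module-level constant `suffixes`: list entries are .inl, plain strings .inr
def pvSuffixes : List (List String ⊕ String) :=
  [.inl ["able", "ible"], .inr "al", .inr "an", .inr "ar", .inr "ed", .inr "en", .inl ["er", "or"],
   .inr "est", .inr "ing", .inl ["ish", "ous", "ful", "less"], .inr "ive", .inr "ly", .inl ["ment", "ness"], .inr "y"]

-- A's inner `for suffix_item in suffix: if word.endswith(...): ... break` with the `selected` flag
def pvAInner (word : String) (grp : List String) : Bool :=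
  match grp with
  | [] => false
  | s :: rest => if PySem.Str.endswith word s then true else pvAInner word rest

-- A's outer loop with its break
def pvALoop (word : String) (rest : List (List String ⊕ String)) : String :=
  match rest with
  | [] => "UNKNOWN"
  | .inl grp :: rest =>
      let word_suffix_class := PySem.Str.upper ((PySem.List.pyGetD grp 0 ""))
      if pvAInner word grp then "UNKNOWN_AFFIXED_WITH_" ++ word_suffix_class
      else pvALoop word rest
  | .inr s :: rest =>
      if PySem.Str.endswith word s then "UNKNOWN_AFFIXED_WITH_" ++ PySem.Str.upper s
      else pvALoop word rest

def get_unknown_word_class_by_suffix (word : String) : String :=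
  pvALoop word pvSuffixes

-- ===== PORT B =====
-- B's module-load flattening of `suffixes` into (suffix, label) pairs
def pvPairs : List (String × String) :=
  pvSuffixes.foldl (fun acc e =>
    match e with
    | .inl grp =>
        let label := PySem.Str.upper (PySem.List.pyGetD grp 0 "")
        acc ++ grp.map (fun item => (item, label))
    | .inr s => acc ++ [(s, PySem.Str.upper s)]) []

-- B's single uniform scan with early return
def pvBScan (word : String) (ps : List (String × String)) : String :=
  match ps with
  | [] => "UNKNOWN"
  | (suf, label) :: rest =>
      if PySem.Str.endswith word suf then "UNKNOWN_AFFIXED_WITH_" ++ label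
      else pvBScan word rest

def get_unknown_word_class_by_suffix_alt (word : String) : String :=
  pvBScan word pvPairs

-- ===== PRECONDITION & SPEC =====
def Spec_get_unknown_word_class_by_suffix (word : String) (out : String) : Prop := out = get_unknown_word_class_by_suffix_alt word
instance (word : String) (out : String) : Decidable (Spec_get_unknown_word_class_by_suffix word out) := by unfold Spec_get_unknown_word_class_by_suffix; infer_instance

-- ===== CLAIM (what is proved, stated in full; the proofs are below) =====
def Claim_equal_get_unknown_word_class_by_suffix : Prop := ∀ (word : String), Dom_get_unknown_word_class_by_suffix word → Spec_get_unknown_word_class_by_suffix word (get_unknown_word_class_by_suffix word)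

-- ===== LEMMAS AND PROOFS =====

-- ===== VERDICT (by name: the statement is the Claim_ definition above) =====
-- proof-only helper: the flattening of a suffix table as a flatMap
def pvFlat (rest : List (List String ⊕ String)) : List (String × String) :=
  rest.flatMap (fun e =>
    match e with
    | .inl grp => grp.map (fun item => (item, PySem.Str.upper (PySem.List.pyGetD grp 0 "")))
    | .inr s => [(s, PySem.Str.upper s)])

theorem pvPairs_eq_flat : pvPairs = pvFlat pvSuffixes := by rfl

theorem pvBScan_map_append (word : String) (label : String) (grp : List String)
    (qs : List (String × String)) :
    pvBScan word (grp.map (fun item => (item, label)) ++ qs) =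
      if pvAInner word grp then "UNKNOWN_AFFIXED_WITH_" ++ label else pvBScan word qs := by
  induction grp with
  | nil => simp [pvAInner]
  | cons s rest ih =>
      simp only [List.map, List.cons_append, pvBScan, pvAInner]
      by_cases h : PySem.Chars.endswith word.toList s.toList <;> simp [h, ih]

theorem pvBScan_flat (word : String) (rest : List (List String ⊕ String)) :
    pvBScan word (pvFlat rest) = pvALoop word rest := by
  induction rest with
  | nil => rfl
  | cons e rest ih =>
      cases e with
      | inl grp =>
          simp only [pvFlat, List.flatMap_cons, pvALoop, pvBScan] at *
          rw [pvBScan_map_append]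
          by_cases h : pvAInner word grp <;> simp [h, ih]
      | inr s =>
          simp only [pvFlat, List.flatMap_cons, List.singleton_append, pvALoop, pvBScan] at *
          by_cases h : PySem.Chars.endswith word.toList s.toList <;> simp [h, ih]

theorem get_unknown_word_class_by_suffix_spec : Claim_equal_get_unknown_word_class_by_suffix := by
  intro word _
  show get_unknown_word_class_by_suffix word = get_unknown_word_class_by_suffix_alt word
  rw [get_unknown_word_class_by_suffix, get_unknown_word_class_by_suffix_alt,
    pvPairs_eq_flat, pvBScan_flat]
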